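-- pv_equiv track=rewrite | github.com/Tiantainer/opensource_software | bug_issues.py | _extract_priority
-- ===== SOURCE A (Python) =====
-- def _extract_priority(labels) -> str:
--     """从标签中提取优先级"""
--     priority_keywords = {
--         'P0': ['p0', 'critical', 'blocker'],
--         'P1': ['p1', 'high', 'important'],
--         'P2': ['p2', 'medium', 'normal'],
--         'P3': ['p3', 'low', 'minor']
--     }
--
--     label_texts = [label.lower() for label in labels]
--
--     for priority, keywords in priority_keywords.items():
--         if any(any(keyword in label for keyword in keywords) for label in label_texts):
--             return priority
--
--     return '未指定'
-- ===== SOURCE B (Python) =====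
-- def _extract_priority(labels) -> str:
--     """从标签中提取优先级 — single pass over labels, collect matched levels, pick highest rank"""
--     groups = {
--         'P0': ['p0', 'critical', 'blocker'],
--         'P1': ['p1', 'high', 'important'],
--         'P2': ['p2', 'medium', 'normal'],
--         'P3': ['p3', 'low', 'minor']
--     }
--     matched = set()
--     for label in labels:
--         text = label.lower()
--         for priority, keywords in groups.items():
--             if any(keyword in text for keyword in keywords):
--                 matched.add(priority)
--     for priority in ['P0', 'P1', 'P2', 'P3']:
--         if priority in matched:
--             return priority
--     return '未指定'
-- ===== Notes on version B (the rewrite author's own statement) =====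
-- stated objective: alternative
-- what changed: B flips the loop nesting: a single label-outer pass accumulates the set of matched priority levels, then the fixed rank order P0..P3 selects the first matched one, instead of A's priority-outer scan with early return.
import Mathlib
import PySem

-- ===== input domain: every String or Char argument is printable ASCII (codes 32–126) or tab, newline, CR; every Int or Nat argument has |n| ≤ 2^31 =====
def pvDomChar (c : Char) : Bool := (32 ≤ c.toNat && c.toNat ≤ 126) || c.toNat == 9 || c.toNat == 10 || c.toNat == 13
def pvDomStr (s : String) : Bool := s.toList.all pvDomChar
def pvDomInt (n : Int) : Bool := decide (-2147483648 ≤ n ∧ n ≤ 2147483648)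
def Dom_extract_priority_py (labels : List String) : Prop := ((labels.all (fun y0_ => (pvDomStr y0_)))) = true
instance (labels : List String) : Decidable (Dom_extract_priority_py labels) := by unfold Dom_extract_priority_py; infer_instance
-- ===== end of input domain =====

-- B flips the loop nesting (label-outer pass accumulating a set of matched levels, then a rank scan)
-- versus A's priority-outer early-return scan; alternative decomposition, same cost.


-- ===== PORT A =====
-- the dict literal of A (insertion order P0, P1, P2, P3)
def pvA_groups : List (String × List String) :=
  [("P0", ["p0", "critical", "blocker"]),
   ("P1", ["p1", "high", "important"]),
   ("P2", ["p2", "medium", "normal"]),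
   ("P3", ["p3", "low", "minor"])]

-- the 'for priority, keywords in …: if any(any(…)): return priority' loop with early return
def pvA_loop (items : List (String × List String)) (label_texts : List String) : String :=
  match items with
  | [] => "未指定"
  | (priority, keywords) :: rest =>
    if label_texts.any (fun label => keywords.any (fun keyword => PySem.Str.isIn keyword label)) then
      priority
    else
      pvA_loop rest label_texts

def extract_priority_py (labels : List String) : String :=
  let label_texts := labels.map (fun label => PySem.Str.lower label)
  pvA_loop pvA_groups label_texts

-- ===== PORT B =====
-- inner 'for priority, keywords in groups.items(): if any(k in text): matched.add(priority)'
def pvB_mark (text : String) (s : PySem.Set String) (g : String × List String) : PySem.Set String :=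
  if g.2.any (fun keyword => PySem.Str.isIn keyword text) then s.add g.1 else s

-- final 'for priority in ['P0','P1','P2','P3']: if priority in matched: return priority'
def pvB_rank (ranks : List String) (matched : PySem.Set String) : String :=
  match ranks with
  | [] => "未指定"
  | priority :: rest => if matched.contains priority then priority else pvB_rank rest matched

def extract_priority_py_alt (labels : List String) : String :=
  let matched := labels.foldl
    (fun s label => pvA_groups.foldl (pvB_mark (PySem.Str.lower label)) s) PySem.Set.empty
  pvB_rank ["P0", "P1", "P2", "P3"] matched

-- ===== PRECONDITION & SPEC =====
def Spec_extract_priority_py (labels : List String) (out : String) : Prop := out = extract_priority_py_alt labels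
instance (labels : List String) (out : String) : Decidable (Spec_extract_priority_py labels out) := by unfold Spec_extract_priority_py; infer_instance

-- ===== CLAIM (what is proved, stated in full; the proofs are below) =====
def Claim_equal_extract_priority_py : Prop := ∀ (labels : List String), Dom_extract_priority_py labels → Spec_extract_priority_py labels (extract_priority_py labels)

-- ===== LEMMAS AND PROOFS =====

theorem pv_contains_add (s : PySem.Set String) (x p : String) :
    (s.add x).contains p = (s.contains p || p == x) := by
  rw [Bool.eq_iff_iff]
  simp only [PySem.Set.add, PySem.Set.contains, List.contains, Bool.or_eq_true]
  by_cases hx : List.elem x s = true <;> simp [hx] <;> aesop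

-- marking pass of one label (text t) over the keyword groups: membership afterwards
theorem pv_contains_markFold (gs : List (String × List String)) (t : String)
    (s : PySem.Set String) (p : String) :
    (gs.foldl (pvB_mark t) s).contains p =
      (s.contains p || gs.any (fun g => p == g.1 && g.2.any (fun kw => PySem.Str.isIn kw t))) := by
  induction gs generalizing s with
  | nil => simp
  | cons g rest ih =>
    simp only [List.foldl_cons, List.any_cons, pvB_mark]
    split
    · rename_i h
      rw [ih, pv_contains_add, h]
      cases s.contains p <;> cases (p == g.1) <;> simp
    · rename_i h
      simp only [Bool.not_eq_true] at h
      rw [ih, h]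
      simp

-- the whole accumulation loop over labels
theorem pv_contains_mainFold (labels : List String) (s : PySem.Set String) (p : String) :
    ((labels.foldl (fun s label => pvA_groups.foldl (pvB_mark (PySem.Str.lower label)) s) s).contains p) =
      (s.contains p ||
        labels.any (fun l => pvA_groups.any
          (fun g => p == g.1 && g.2.any (fun kw => PySem.Str.isIn kw (PySem.Str.lower l))))) := by
  induction labels generalizing s with
  | nil => simp
  | cons l rest ih =>
    simp only [List.foldl_cons, List.any_cons]
    rw [ih, pv_contains_markFold, Bool.or_assoc]

-- whether any label matches one keyword group
def pvHit (labels : List String) (kws : List String) : Bool :=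
  labels.any (fun l => kws.any (fun kw => PySem.Str.isIn kw (PySem.Str.lower l)))

theorem pv_matched_contains (labels : List String) (p : String) (kws : List String)
    (hmem : (p, kws) ∈ pvA_groups) :
    ((labels.foldl (fun s label => pvA_groups.foldl (pvB_mark (PySem.Str.lower label)) s)
        PySem.Set.empty).contains p) = pvHit labels kws := by
  rw [pv_contains_mainFold]
  have hempty : (PySem.Set.empty : PySem.Set String).contains p = false := rfl
  rw [hempty, Bool.false_or]
  unfold pvHit
  fin_cases hmem <;>
  · refine List.any_congr rfl (fun l => ?_)
    simp [pvA_groups]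

def pvIfChain (labels : List String) : String :=
  if pvHit labels ["p0", "critical", "blocker"] then "P0"
  else if pvHit labels ["p1", "high", "important"] then "P1"
  else if pvHit labels ["p2", "medium", "normal"] then "P2"
  else if pvHit labels ["p3", "low", "minor"] then "P3"
  else "未指定"

theorem pvB_eq (labels : List String) : extract_priority_py_alt labels = pvIfChain labels := by
  unfold extract_priority_py_alt pvIfChain
  simp only [pvB_rank]
  rw [pv_matched_contains labels "P0" ["p0", "critical", "blocker"] (by unfold pvA_groups; simp),
      pv_matched_contains labels "P1" ["p1", "high", "important"] (by unfold pvA_groups; simp),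
      pv_matched_contains labels "P2" ["p2", "medium", "normal"] (by unfold pvA_groups; simp),
      pv_matched_contains labels "P3" ["p3", "low", "minor"] (by unfold pvA_groups; simp)]

theorem pvA_eq (labels : List String) : extract_priority_py labels = pvIfChain labels := by
  unfold extract_priority_py pvA_groups pvIfChain
  simp only [pvA_loop]
  have hA : ∀ kws : List String,
      ((labels.map (fun label => PySem.Str.lower label)).any
        (fun label => kws.any (fun kw => PySem.Str.isIn kw label))) = pvHit labels kws := by
    intro kws
    rw [List.any_map]
    rfl
  rw [hA, hA, hA, hA]

-- ===== VERDICT (by name: the statement is the Claim_ definition above) =====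
theorem extract_priority_py_spec : Claim_equal_extract_priority_py := by
  intro labels _
  unfold Spec_extract_priority_py
  rw [pvA_eq, pvB_eq]
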